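-- pv_equiv track=rewrite | github.com/Devendra33/HackerRank | Problem Solving/Minimum Distances.py | minimumDistances
-- ===== SOURCE A (Python) =====
-- def minimumDistances(a):
--     setlst = list(set(a))
--     dis = []
--     for  i  in setlst:
--         if a.count(i) >= 2:
--             s1 = a.index(i)  # 1st index value
--             s2 = a.index(i,s1+1,len(a))   # 2nd index value
--             dis.append(s2-s1)
--     if len(dis) == 0:
--         return -1
--     else:
--         return min(dis)
-- ===== SOURCE B (Python) =====
-- def minimumDistances(a):
--     first = {}
--     done = set()
--     best = -1
--     for i, x in enumerate(a):
--         if x not in first: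
--             first[x] = i
--         elif x not in done:
--             gap = i - first[x]
--             if best == -1 or gap < best:
--                 best = gap
--             done.add(x)
--     return best
-- ===== Notes on version B (the rewrite author's own statement) =====
-- stated objective: faster
-- what changed: Replaced the per-distinct-value scans (count + two index calls over the whole list) by a single left-to-right pass that records each value's first occurrence in a dict and folds the gap into a running minimum at its second occurrence.
import Mathlib
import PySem

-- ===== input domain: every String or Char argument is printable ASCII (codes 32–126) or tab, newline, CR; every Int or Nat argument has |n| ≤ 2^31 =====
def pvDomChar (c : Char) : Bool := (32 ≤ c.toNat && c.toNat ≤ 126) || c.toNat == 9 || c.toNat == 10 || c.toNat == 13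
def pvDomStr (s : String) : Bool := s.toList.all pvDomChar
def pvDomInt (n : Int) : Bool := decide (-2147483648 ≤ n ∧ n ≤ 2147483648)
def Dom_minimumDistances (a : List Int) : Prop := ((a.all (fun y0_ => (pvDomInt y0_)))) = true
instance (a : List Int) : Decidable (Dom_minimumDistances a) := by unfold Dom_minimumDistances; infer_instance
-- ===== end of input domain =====

-- B replaces A's per-distinct-value whole-list scans (count + two index calls) by one
-- left-to-right pass with a dict of first-occurrence indices (objective: faster, O(n) vs O(n^2)).

-- ===== PORT A =====
-- for i in list(set(a)): if a.count(i) >= 2: s1 = a.index(i); s2 = a.index(i, s1+1, len(a)); dis.append(s2-s1)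
-- set(a) is consumed only through min(dis), which is independent of the set's iteration order.
def minimumDistances (a : List Int) : Int :=
  let setlst := PySem.Set.ofList a
  let dis := setlst.foldl (fun dis i =>
    if 2 ≤ PySem.List.count a i then
      match PySem.List.index? a i with
      | some s1 =>
        match PySem.List.index? (PySem.List.slice a (some ((s1 : Int) + 1)) (some (a.length : Int))) i with
        | some k => dis ++ [((s1 : Int) + 1 + (k : Int)) - (s1 : Int)]  -- s2 - s1, s2 absolute
        | none => dis  -- unreachable: a.count(i) ≥ 2 guarantees a second occurrence
      | none => dis    -- unreachable: a.count(i) ≥ 2 guarantees i ∈ a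
    else dis) []
  if dis.length = 0 then -1
  else
    match PySem.List.min? dis (fun x => x) with
    | some m => m
    | none => -1       -- unreachable: dis ≠ []

-- ===== PORT B =====
-- for i, x in enumerate(a): if x not in first: first[x] = i; elif x not in done: fold gap into best
def minimumDistancesAltLoop (l : List Int) (i : Int) (first : PySem.Dict Int Int)
    (done : PySem.Set Int) (best : Int) : Int :=
  match l with
  | [] => best
  | x :: rest =>
    if first.contains x = false then
      minimumDistancesAltLoop rest (i + 1) (first.insert x i) done best
    else if PySem.Set.contains done x = false then
      let gap := i - first.getD x 0   -- first[x]: key present because first.contains x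
      minimumDistancesAltLoop rest (i + 1) first (PySem.Set.add done x)
        (if best = -1 ∨ gap < best then gap else best)
    else
      minimumDistancesAltLoop rest (i + 1) first done best

def minimumDistances_alt (a : List Int) : Int :=
  minimumDistancesAltLoop a 0 PySem.Dict.empty PySem.Set.empty (-1)

-- ===== PRECONDITION & SPEC =====
def Spec_minimumDistances (a : List Int) (out : Int) : Prop := out = minimumDistances_alt a
instance (a : List Int) (out : Int) : Decidable (Spec_minimumDistances a out) := by unfold Spec_minimumDistances; infer_instance

-- ===== CLAIM (what is proved, stated in full; the proofs are below) =====
def Claim_equal_minimumDistances : Prop := ∀ (a : List Int), Dom_minimumDistances a → Spec_minimumDistances a (minimumDistances a)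

-- ===== LEMMAS AND PROOFS =====

def pvFromMin (l : List Int) : Int :=
  match PySem.List.min? l (fun x => x) with
  | some m => m
  | none => -1

theorem pvFromMin_eq_of {l : List Int} {c : Int} (hc : c ∈ l) (hmin : ∀ y ∈ l, c ≤ y) :
    pvFromMin l = c := by
  have hne : l ≠ [] := by rintro rfl; simp at hc
  unfold pvFromMin
  cases hm : PySem.List.min? l (fun x => x) with
  | none => exact absurd ((PySem.List.min?_eq_none_iff l _).mp hm) hne
  | some m =>
    have h1 : m ∈ l := PySem.List.min?_mem hm
    have h2 := PySem.List.min?_isMin hm c hc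
    exact le_antisymm h2 (hmin m h1)

theorem pvFromMin_spec {l : List Int} (hne : l ≠ []) :
    pvFromMin l ∈ l ∧ ∀ y ∈ l, pvFromMin l ≤ y := by
  unfold pvFromMin
  cases hm : PySem.List.min? l (fun x => x) with
  | none => exact absurd ((PySem.List.min?_eq_none_iff l _).mp hm) hne
  | some m => exact ⟨PySem.List.min?_mem hm, fun y hy => PySem.List.min?_isMin hm y hy⟩

theorem pvFromMin_perm {l l' : List Int} (h : l.Perm l') : pvFromMin l = pvFromMin l' := by
  rcases eq_or_ne l' [] with rfl | hne'
  · rw [List.perm_nil.mp h]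
  · have hne : l ≠ [] := by rintro rfl; exact hne' (List.nil_perm.mp h)
    obtain ⟨hm', hmin'⟩ := pvFromMin_spec hne'
    exact pvFromMin_eq_of (h.symm.mem_iff.mp hm') (fun y hy => hmin' y (h.mem_iff.mp hy))

theorem pvFromMin_cons {l : List Int} {g : Int} (hl : ∀ y ∈ l, 0 < y) (hg : 0 < g) :
    pvFromMin (g :: l) = if pvFromMin l = -1 ∨ g < pvFromMin l then g else pvFromMin l := by
  rcases eq_or_ne l [] with rfl | hne
  · have h1 : pvFromMin [g] = g := pvFromMin_eq_of (by simp) (by simp)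
    have h0 : pvFromMin ([] : List Int) = -1 := by simp [pvFromMin, PySem.List.min?]
    rw [h1, h0]; simp
  · obtain ⟨hm, hmin⟩ := pvFromMin_spec hne
    have hb : pvFromMin l ≠ -1 := by have := hl _ hm; omega
    by_cases hlt : g < pvFromMin l
    · rw [if_pos (Or.inr hlt)]
      exact pvFromMin_eq_of (by simp) (by
        intro y hy; rcases List.mem_cons.mp hy with rfl | hy
        · exact le_refl _
        · exact le_trans (le_of_lt hlt) (hmin y hy))
    · rw [if_neg (by omega)]
      exact pvFromMin_eq_of (List.mem_cons_of_mem _ hm) (by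
        intro y hy; rcases List.mem_cons.mp hy with rfl | hy
        · omega
        · exact hmin y hy)

def pvGap (pre : List Int) (v : Int) : Int :=
  (((PySem.List.index? (pre.drop ((PySem.List.index? pre v).getD 0 + 1)) v).getD 0 + 1 : Nat) : Int)

theorem pvGap_pos (pre : List Int) (v : Int) : 0 < pvGap pre v := by
  unfold pvGap; exact_mod_cast Nat.succ_pos _


theorem pvDropMid (p : List Int) (v : Int) (t : List Int) :
    (p ++ v :: t).drop (p.length + 1) = t := by
  induction p with
  | nil => simp
  | cons h tl ih => simpa using ih

theorem pvSplit {a : List Int} {v : Int} (h2 : 2 ≤ List.count v a) :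
    ∃ p s, a = p ++ v :: s ∧ v ∉ p ∧ PySem.List.index? a v = some p.length ∧
      a.drop (p.length + 1) = s ∧ v ∈ s := by
  have hv : v ∈ a := List.count_pos_iff.mp (by omega)
  have hsome : (PySem.List.index? a v).isSome := (PySem.List.index?_isSome_iff a v).mpr hv
  obtain ⟨k, hk⟩ := Option.isSome_iff_exists.mp hsome
  obtain ⟨p, s, rfl, hlen, hvp⟩ := (PySem.List.index?_eq_some_iff _ v k).mp hk
  refine ⟨p, s, rfl, hvp, by rw [hk, hlen], ?_, ?_⟩
  · exact pvDropMid p v s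
  · have hcp : List.count v p = 0 := List.count_eq_zero.mpr hvp
    have : List.count v (p ++ v :: s) = List.count v s + 1 := by
      simp [List.count_append, hcp, List.count_cons]
    have : 1 ≤ List.count v s := by omega
    exact List.count_pos_iff.mp this

-- the first-occurrence index, as B's dict stores it
theorem pvGap_stable {pre : List Int} {v : Int} (x : Int) (h2 : 2 ≤ List.count v pre) :
    pvGap (pre ++ [x]) v = pvGap pre v := by
  obtain ⟨p, s, hpre, hvp, hidx, hdrop, hvs⟩ := pvSplit h2
  have hvmem : v ∈ pre := by rw [hpre]; simp
  unfold pvGap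
  rw [PySem.List.index?_append_of_mem _ hvmem, hidx]
  have hdrop' : (pre ++ [x]).drop (p.length + 1) = s ++ [x] := by
    rw [hpre, List.append_assoc]; simpa using pvDropMid p v (s ++ [x])
  simp only [Option.getD_some, hdrop', hdrop]
  rw [PySem.List.index?_append_of_mem _ hvs]

theorem pvGap_second {pre : List Int} {x : Int} (hmem : x ∈ pre) (h1 : List.count x pre = 1) :
    pvGap (pre ++ [x]) x = (pre.length : Int) - ((PySem.List.index? pre x).getD 0 : Int) := by
  have hsome : (PySem.List.index? pre x).isSome := (PySem.List.index?_isSome_iff pre x).mpr hmem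
  obtain ⟨k, hk⟩ := Option.isSome_iff_exists.mp hsome
  obtain ⟨p, s, hpre, hlen, hvp⟩ := (PySem.List.index?_eq_some_iff _ x k).mp hk
  have hxs : x ∉ s := by
    intro hxs
    have hcp : List.count x p = 0 := List.count_eq_zero.mpr hvp
    have : List.count x pre = List.count x s + 1 := by
      rw [hpre]; simp [List.count_append, hcp, List.count_cons]
    have := List.count_pos_iff.mpr hxs
    omega
  unfold pvGap
  rw [PySem.List.index?_append_of_mem _ hmem, hk]
  have hdrop' : (pre ++ [x]).drop (k + 1) = s ++ [x] := by
    rw [hpre, ← hlen, List.append_assoc]; simpa using pvDropMid p x (s ++ [x])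
  simp only [Option.getD_some, hdrop']
  rw [PySem.List.index?_append_singleton_self _ _ hxs]
  have hklen : pre.length = k + 1 + s.length := by rw [hpre, ← hlen]; simp; omega
  simp [hklen]; omega

def pvGaps (pre : List Int) : List Int :=
  ((PySem.List.dedup pre).filter (fun v => decide (2 ≤ PySem.List.count pre v))).map (pvGap pre)

def pvBestOf (pre : List Int) : Int := pvFromMin (pvGaps pre)

theorem pvGaps_pos (pre : List Int) : ∀ y ∈ pvGaps pre, 0 < y := by
  intro y hy
  obtain ⟨v, _, rfl⟩ := List.mem_map.mp hy
  exact pvGap_pos _ _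

theorem pvDedupAppend (l : List Int) (x : Int) :
    PySem.List.dedup (l ++ [x]) =
      if x ∈ l then PySem.List.dedup l else PySem.List.dedup l ++ [x] := by
  rw [PySem.List.dedup_eq_ofList, PySem.List.dedup_eq_ofList, PySem.Set.ofList_eq_foldl,
    List.foldl_append, ← PySem.Set.ofList_eq_foldl]
  show PySem.Set.add _ x = _
  have : PySem.Set.add (PySem.Set.ofList l) x =
      if (PySem.Set.ofList l).contains x then PySem.Set.ofList l else PySem.Set.ofList l ++ [x] := rfl
  rw [this, PySem.Set.contains_eq_decide]
  simp only [PySem.Set.mem_ofList]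
  by_cases h : x ∈ l
  · simp [h]
  · simp [h]

-- count over pre ++ [x]
theorem pvCountApp (pre : List Int) (x v : Int) :
    List.count v (pre ++ [x]) = List.count v pre + (if v = x then 1 else 0) := by
  rw [List.count_append]
  by_cases h : v = x
  · subst h; simp
  · rw [if_neg h]
    have : List.count v [x] = 0 := List.count_eq_zero.mpr (by simp [h])
    omega

theorem pvCountFilter (p : Int → Bool) (a : Int) (l : List Int) :
    List.count a (l.filter p) = if p a = true then List.count a l else 0 := by
  by_cases h : p a = true
  · rw [if_pos h, List.count_filter h]
  · rw [if_neg h, List.count_eq_zero]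
    intro hm; exact h (List.mem_filter.mp hm).2

-- B1: new distinct value, not repeated yet: gaps unchanged
theorem pvBestOf_new {pre : List Int} {x : Int} (hx : x ∉ pre) :
    pvBestOf (pre ++ [x]) = pvBestOf pre := by
  unfold pvBestOf
  congr 1
  unfold pvGaps
  rw [pvDedupAppend, if_neg hx, List.filter_append]
  have h0 : List.count x pre = 0 := List.count_eq_zero.mpr hx
  have hx1 : List.count x (pre ++ [x]) = 1 := by rw [pvCountApp, h0]; simp
  have h2 : List.filter (fun v => decide (2 ≤ PySem.List.count (pre ++ [x]) v)) [x] = [] := by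
    have hq : decide (2 ≤ PySem.List.count (pre ++ [x]) x) = false := by
      rw [PySem.List.count_eq, hx1]; simp
    simp only [List.filter, hq]
  rw [h2, List.append_nil]
  rw [List.filter_congr (fun v hv => ?_), List.map_congr_left (fun v hv => ?_)]
  · -- map congr: members of the filtered list are repeated in pre
    have hmem := List.mem_filter.mp hv
    have hvp : v ∈ pre := (PySem.List.mem_dedup pre v).mp hmem.1
    have hcnt : 2 ≤ List.count v pre := by
      have := of_decide_eq_true hmem.2
      rwa [PySem.List.count_eq] at this
    exact pvGap_stable x hcnt
  · -- filter congr: counts agree for v ∈ dedup pre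
    have hvp : v ∈ pre := (PySem.List.mem_dedup pre v).mp hv
    have hne : v ≠ x := fun h => hx (h ▸ hvp)
    have hcv : List.count v (pre ++ [x]) = List.count v pre := by
      rw [pvCountApp]; simp [hne]
    simp [PySem.List.count_eq, hcv]

-- B2: value already repeated: gaps unchanged
theorem pvBestOf_rep {pre : List Int} {x : Int} (hx : x ∈ pre) (h2 : 2 ≤ List.count x pre) :
    pvBestOf (pre ++ [x]) = pvBestOf pre := by
  unfold pvBestOf
  congr 1
  unfold pvGaps
  rw [pvDedupAppend, if_pos hx]
  rw [List.filter_congr (fun v hv => ?_), List.map_congr_left (fun v hv => ?_)]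
  · have hmem := List.mem_filter.mp hv
    have hcnt : 2 ≤ List.count v pre := by
      have := of_decide_eq_true hmem.2
      rwa [PySem.List.count_eq] at this
    exact pvGap_stable x hcnt
  · by_cases hvx : v = x
    · subst hvx
      have hc : List.count v (pre ++ [v]) = List.count v pre + 1 := by
        rw [pvCountApp]; simp
      rw [PySem.List.count_eq, PySem.List.count_eq, hc]
      exact decide_eq_decide.mpr (by omega)
    · have hcv : List.count v (pre ++ [x]) = List.count v pre := by
        rw [pvCountApp]; simp [hvx]
      simp [PySem.List.count_eq, hcv]

-- B3: second occurrence arrives: the new gap joins the pool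
theorem pvBestOf_second {pre : List Int} {x : Int} (hx : x ∈ pre) (h1 : List.count x pre = 1) :
    pvBestOf (pre ++ [x]) =
      (if pvBestOf pre = -1 ∨ pvGap (pre ++ [x]) x < pvBestOf pre
       then pvGap (pre ++ [x]) x else pvBestOf pre) := by
  have hperm : (pvGaps (pre ++ [x])).Perm (pvGap (pre ++ [x]) x :: pvGaps pre) := by
    unfold pvGaps
    rw [pvDedupAppend, if_pos hx]
    -- filtered list with the new predicate is a permutation of x :: old filtered list
    have hfil : ((PySem.List.dedup pre).filter
        (fun v => decide (2 ≤ PySem.List.count (pre ++ [x]) v))).Perm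
        (x :: (PySem.List.dedup pre).filter (fun v => decide (2 ≤ PySem.List.count pre v))) := by
      apply (List.perm_iff_count).mpr
      intro y
      have hnd := PySem.List.nodup_dedup pre
      have hxd : x ∈ PySem.List.dedup pre := (PySem.List.mem_dedup pre x).mpr hx
      rw [pvCountFilter]
      by_cases hyx : y = x
      · subst hyx
        have hc2 : List.count y (pre ++ [y]) = 2 := by rw [pvCountApp, h1]; simp
        have hq1 : decide (2 ≤ PySem.List.count (pre ++ [y]) y) = true := by
          rw [PySem.List.count_eq, hc2]; simp
        have hq0 : decide (2 ≤ PySem.List.count pre y) = false := by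
          rw [PySem.List.count_eq, h1]; simp
        rw [List.count_cons_self, pvCountFilter]
        simp only [hq1, hq0, if_true]
        have hcx := List.count_eq_one_of_mem hnd hxd
        rw [PySem.List.dedup_eq_ofList] at hcx
        simp [hcx]
      · have hcv : List.count y (pre ++ [x]) = List.count y pre := by
          rw [pvCountApp]; simp [hyx]
        rw [List.count_cons_of_ne (fun h => hyx h.symm), pvCountFilter]
        rw [PySem.List.count_eq, PySem.List.count_eq, hcv]
    have hmapeq : ((PySem.List.dedup pre).filter
        (fun v => decide (2 ≤ PySem.List.count pre v))).map (pvGap (pre ++ [x])) =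
        ((PySem.List.dedup pre).filter
        (fun v => decide (2 ≤ PySem.List.count pre v))).map (pvGap pre) := by
      apply List.map_congr_left
      intro v hv
      have hmem := List.mem_filter.mp hv
      have hcnt : 2 ≤ List.count v pre := by
        have := of_decide_eq_true hmem.2
        rwa [PySem.List.count_eq] at this
      exact pvGap_stable x hcnt
    have h2 := hfil.map (pvGap (pre ++ [x]))
    rw [List.map_cons, hmapeq] at h2
    exact h2
  unfold pvBestOf
  rw [pvFromMin_perm hperm]
  exact pvFromMin_cons (pvGaps_pos pre) (pvGap_pos _ _)

theorem pvMemAppSelf {pre : List Int} {x : Int} (hx : x ∈ pre) (v : Int) :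
    (v ∈ pre ++ [x]) ↔ v ∈ pre := by
  simp only [List.mem_append, List.mem_singleton]
  constructor
  · rintro (h | rfl); exacts [h, hx]
  · exact Or.inl

-- A's appended distance for a repeated value is pvGap
theorem pvBody_eq (a : List Int) (dis : List Int) (v : Int) :
    (if 2 ≤ PySem.List.count a v then
      match PySem.List.index? a v with
      | some s1 =>
        match PySem.List.index? (PySem.List.slice a (some ((s1 : Int) + 1)) (some (a.length : Int))) v with
        | some k => dis ++ [((s1 : Int) + 1 + (k : Int)) - (s1 : Int)]
        | none => dis
      | none => dis
    else dis) =
    (if 2 ≤ PySem.List.count a v then dis ++ [pvGap a v] else dis) := by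
  by_cases hc : 2 ≤ PySem.List.count a v
  · rw [if_pos hc, if_pos hc]
    have hc' : 2 ≤ List.count v a := by rwa [PySem.List.count_eq] at hc
    obtain ⟨p, s, hpre, hvp, hidx, hdrop, hvs⟩ := pvSplit hc'
    rw [hidx]
    dsimp only
    have hslice : PySem.List.slice a (some ((p.length : Int) + 1)) (some (a.length : Int)) = s := by
      have hcast : ((p.length : Int) + 1) = (((p.length + 1 : Nat) : Int)) := by push_cast; ring
      rw [hcast, PySem.List.slice_natCast, hdrop]
      apply List.take_of_length_le
      have : a.length = p.length + 1 + s.length := by rw [hpre]; simp; omega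
      omega
    rw [hslice]
    have hsv : (PySem.List.index? s v).isSome := (PySem.List.index?_isSome_iff s v).mpr hvs
    obtain ⟨k, hk⟩ := Option.isSome_iff_exists.mp hsv
    rw [hk]
    dsimp only
    have hgap : pvGap a v = ((k + 1 : Nat) : Int) := by
      unfold pvGap
      rw [hidx, Option.getD_some, hdrop, hk, Option.getD_some]
    rw [hgap]
    congr 1
    push_cast
    ring_nf
  · rw [if_neg hc, if_neg hc]

theorem pvFoldApp (a : List Int) (l : List Int) (init : List Int) :
    l.foldl (fun dis v => if 2 ≤ PySem.List.count a v then dis ++ [pvGap a v] else dis) init =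
      init ++ (l.filter (fun v => decide (2 ≤ PySem.List.count a v))).map (pvGap a) := by
  induction l generalizing init with
  | nil => simp
  | cons h t ih =>
    by_cases hc : 2 ≤ PySem.List.count a h
    · rw [List.foldl_cons, if_pos hc, ih, List.filter_cons_of_pos (by simpa using hc),
        List.map_cons]
      simp
    · rw [List.foldl_cons, if_neg hc, ih, List.filter_cons_of_neg (by simpa using hc)]

-- A computes the minimum of the gap pool (or -1)
theorem pvA_eq (a : List Int) : minimumDistances a = pvBestOf a := by
  unfold minimumDistances
  dsimp only
  have hbody : (PySem.Set.ofList a).foldl (fun dis i =>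
      if 2 ≤ PySem.List.count a i then
        match PySem.List.index? a i with
        | some s1 =>
          match PySem.List.index? (PySem.List.slice a (some ((s1 : Int) + 1)) (some (a.length : Int))) i with
          | some k => dis ++ [((s1 : Int) + 1 + (k : Int)) - (s1 : Int)]
          | none => dis
        | none => dis
      else dis) [] = pvGaps a := by
    rw [PySem.List.foldl_congr_mem _ _
      (fun dis v => if 2 ≤ PySem.List.count a v then dis ++ [pvGap a v] else dis) _
      (fun acc x _ => pvBody_eq a acc x)]
    rw [pvFoldApp]
    unfold pvGaps
    rw [PySem.List.dedup_eq_ofList]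
    simp
  rw [hbody]
  unfold pvBestOf pvFromMin
  rcases eq_or_ne (pvGaps a) [] with hnil | hne
  · rw [hnil]
    simp [PySem.List.min?]
  · rw [if_neg (by simpa using fun h => hne (List.length_eq_zero_iff.mp h))]

-- B's loop invariant: processing the suffix extends the prefix's answer
theorem pvAltLoop_spec (suf : List Int) : ∀ (pre : List Int) (first : PySem.Dict Int Int)
    (done : PySem.Set Int),
    (∀ v : Int, first.contains v = decide (v ∈ pre)) →
    (∀ v ∈ pre, first.getD v 0 = (((PySem.List.index? pre v).getD 0 : Nat) : Int)) →
    (∀ v : Int, PySem.Set.contains done v = decide (2 ≤ List.count v pre)) →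
    minimumDistancesAltLoop suf (pre.length : Int) first done (pvBestOf pre) =
      pvBestOf (pre ++ suf) := by
  induction suf with
  | nil => intro pre first done _ _ _; simp [minimumDistancesAltLoop]
  | cons x rest ih =>
    intro pre first done h1 h2 h3
    rw [minimumDistancesAltLoop]
    by_cases hx : x ∈ pre
    · rw [h1 x, decide_eq_true hx]
      simp only [Bool.true_eq_false, if_false]
      by_cases hrep : 2 ≤ List.count x pre
      · -- third (or later) occurrence: nothing changes
        rw [h3 x, decide_eq_true hrep]
        simp only [Bool.true_eq_false, if_false]
        have hlen : ((pre ++ [x]).length : Int) = (pre.length : Int) + 1 := by simp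
        have hbo : pvBestOf pre = pvBestOf (pre ++ [x]) := (pvBestOf_rep hx hrep).symm
        rw [hbo, ← hlen, ih (pre ++ [x]) first done ?_ ?_ ?_, List.append_assoc,
          List.singleton_append]
        · intro v; rw [h1 v]; exact (decide_eq_decide.mpr (pvMemAppSelf hx v)).symm
        · intro v hv
          have hvpre : v ∈ pre := (pvMemAppSelf hx v).mp hv
          rw [h2 v hvpre, PySem.List.index?_append_of_mem _ hvpre]
        · intro v
          rw [h3 v, pvCountApp]
          simp only [decide_eq_decide]
          by_cases hvx : v = x
          · subst hvx
            rw [if_pos rfl]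
            omega
          · simp [hvx]
      · -- second occurrence: fold the gap into the minimum
        have h1c : List.count x pre = 1 := by
          have := List.count_pos_iff.mpr hx
          omega
        rw [h3 x, decide_eq_false hrep]
        simp only [if_true]
        have hgap : (pre.length : Int) - first.getD x 0 = pvGap (pre ++ [x]) x := by
          rw [h2 x hx, pvGap_second hx h1c]
        have hbo : (if pvBestOf pre = -1 ∨ (pre.length : Int) - first.getD x 0 < pvBestOf pre
            then (pre.length : Int) - first.getD x 0 else pvBestOf pre) = pvBestOf (pre ++ [x]) := by
          rw [hgap, (pvBestOf_second hx h1c)]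
        have hlen : ((pre ++ [x]).length : Int) = (pre.length : Int) + 1 := by simp
        rw [hbo, ← hlen, ih (pre ++ [x]) first (PySem.Set.add done x) ?_ ?_ ?_,
          List.append_assoc, List.singleton_append]
        · intro v; rw [h1 v]; exact (decide_eq_decide.mpr (pvMemAppSelf hx v)).symm
        · intro v hv
          have hvpre : v ∈ pre := (pvMemAppSelf hx v).mp hv
          rw [h2 v hvpre, PySem.List.index?_append_of_mem _ hvpre]
        · intro v
          rw [PySem.Set.contains_eq_decide, pvCountApp]
          simp only [decide_eq_decide]
          rw [PySem.Set.mem_add]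
          have hvd : (v ∈ done) ↔ (2 ≤ List.count v pre) := by
            have h := h3 v
            rw [PySem.Set.contains_eq_decide] at h
            exact decide_eq_decide.mp h
          by_cases hvx : v = x
          · subst hvx
            simp [h1c]
          · simp [hvx, hvd]
    · -- first occurrence: record the index
      rw [h1 x, decide_eq_false hx]
      simp only [if_true]
      have hlen : ((pre ++ [x]).length : Int) = (pre.length : Int) + 1 := by simp
      have hbo : pvBestOf pre = pvBestOf (pre ++ [x]) := (pvBestOf_new hx).symm
      rw [hbo, ← hlen, ih (pre ++ [x]) (first.insert x (pre.length : Int)) done ?_ ?_ ?_,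
        List.append_assoc, List.singleton_append]
      · intro v
        rw [PySem.Dict.contains_insert, h1 v]
        by_cases hvx : v = x
        · subst hvx; simp
        · simp [hvx]
      · intro v hv
        rw [PySem.Dict.getD_insert]
        by_cases hvx : v = x
        · subst hvx
          rw [if_pos rfl, PySem.List.index?_append_singleton_self _ _ hx, Option.getD_some]
        · have hvpre : v ∈ pre := by
            rcases List.mem_append.mp hv with h | h
            · exact h
            · exact absurd (List.mem_singleton.mp h) hvx
          rw [if_neg hvx, h2 v hvpre, PySem.List.index?_append_of_mem _ hvpre]
      · intro v
        rw [h3 v, pvCountApp]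
        by_cases hvx : v = x
        · subst hvx
          have h0 : List.count v pre = 0 := List.count_eq_zero.mpr hx
          simp [h0]
        · simp [hvx]

theorem pvB_eq (a : List Int) : minimumDistances_alt a = pvBestOf a := by
  unfold minimumDistances_alt
  have h := pvAltLoop_spec a [] PySem.Dict.empty PySem.Set.empty
    (fun v => by simp [PySem.Dict.contains_empty])
    (fun v hv => by simp at hv)
    (fun v => by
      rw [PySem.Set.contains_eq_decide]
      simp [PySem.Set.empty])
  have hbo : pvBestOf ([] : List Int) = -1 := by
    unfold pvBestOf pvGaps pvFromMin
    simp [PySem.List.dedup, PySem.List.min?]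
  simpa [hbo] using h

-- ===== VERDICT (by name: the statement is the Claim_ definition above) =====
theorem minimumDistances_spec : Claim_equal_minimumDistances := by
  intro a _
  unfold Spec_minimumDistances
  rw [pvA_eq, pvB_eq]
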